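-- pv_equiv track=rewrite | github.com/vkovinicTT/tt-swiss | ttchop/summary.py | _build_depth_map
-- ===== SOURCE A (Python) =====
-- from typing import Any, Dict, List, Tuple
--
-- def _build_depth_map(modules: List[Dict[str, Any]]) -> Dict[str, int]:
--     """Build module_path -> tree depth map using parent chain.
--
--     Root module (parent=None) gets depth 0, its children get depth 1, etc.
--     """
--     # Build parent lookup: module_path -> parent_path
--     parent_of: Dict[str, str] = {}
--     for m in modules:
--         path = m.get("module_path", "")
--         parent = m.get("parent")
--         if parent:
--             parent_of[path] = parent
--
--     depths: Dict[str, int] = {}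
--
--     def get_depth(path: str) -> int:
--         if path in depths:
--             return depths[path]
--         parent = parent_of.get(path)
--         if not parent:
--             depths[path] = 0
--             return 0
--         d = get_depth(parent) + 1
--         depths[path] = d
--         return d
--
--     for m in modules:
--         get_depth(m.get("module_path", ""))
--
--     return depths
-- ===== SOURCE B (Python) =====
-- from typing import Any, Dict, List
--
--
-- def _build_depth_map(modules: List[Dict[str, Any]]) -> Dict[str, int]:
--     """Iterative variant: walk each parent chain up with an explicit stack,
--     then assign depths root-downward. Same memo dict (contents and insertion
--     order) as the memoized recursion."""
--     parent_of: Dict[str, str] = {}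
--     for m in modules:
--         path = m.get("module_path", "")
--         parent = m.get("parent")
--         if parent:
--             parent_of[path] = parent
--
--     depths: Dict[str, int] = {}
--     cap = len(parent_of) + 1  # an acyclic parent chain cannot be longer
--
--     def resolve(path: str) -> None:
--         stack: List[str] = []
--         cur = path
--         base = 0
--         for _ in range(cap):
--             if cur in depths:
--                 base = depths[cur]
--                 break
--             parent = parent_of.get(cur)
--             if not parent:
--                 depths[cur] = 0
--                 base = 0
--                 break
--             stack.append(cur)
--             cur = parent
--         d = base
--         for node in reversed(stack):
--             d += 1
--             depths[node] = d
--
--     for m in modules: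
--         resolve(m.get("module_path", ""))
--
--     return depths
-- ===== Notes on version B (the rewrite author's own statement) =====
-- stated objective: alternative
-- what changed: Replaces the memoized recursive get_depth with an iterative stack walk: each unresolved parent chain is climbed with an explicit stack and then assigned root-downward, producing the same depths dict in the same insertion order.
-- outside the precondition, e.g. on _build_depth_map([{'module_path': 'x', 'parent': 'x'}]): A raises RecursionError, B returns {'x': 2}
import Mathlib
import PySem

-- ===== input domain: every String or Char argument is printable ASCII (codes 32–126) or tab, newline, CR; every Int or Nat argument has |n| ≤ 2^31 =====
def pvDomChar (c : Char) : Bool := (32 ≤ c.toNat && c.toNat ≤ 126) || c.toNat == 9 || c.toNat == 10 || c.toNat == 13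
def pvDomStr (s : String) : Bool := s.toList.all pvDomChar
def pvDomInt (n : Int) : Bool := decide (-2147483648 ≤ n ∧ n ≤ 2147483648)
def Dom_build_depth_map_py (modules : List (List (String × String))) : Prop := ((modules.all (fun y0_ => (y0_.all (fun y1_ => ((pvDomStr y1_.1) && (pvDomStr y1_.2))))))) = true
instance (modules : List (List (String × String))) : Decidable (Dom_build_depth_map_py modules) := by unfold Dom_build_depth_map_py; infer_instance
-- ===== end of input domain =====

-- B replaces A's memoized recursion by an explicit stack walk up the parent chain
-- with a root-downward assignment pass (different decomposition, same cost).

-- ===== PORT A =====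
-- parent_of is built identically in both Pythons (same loop); shared helper.
def pvParentOf (modules : List (List (String × String))) : PySem.Dict String String :=
  modules.foldl (fun po m =>
    let path := (PySem.Dict.mk m).getD "module_path" ""
    match (PySem.Dict.mk m).get? "parent" with
    | none => po
    | some p => if p = "" then po else po.insert path p) PySem.Dict.empty

-- A's recursive memoized get_depth; fuel only guards termination (Python has none
-- and raises RecursionError on a cyclic chain — excluded by Pre_ below).
def pvGetDepth (po : PySem.Dict String String) :
    Nat → String → PySem.Dict String Int → Int × PySem.Dict String Int
  | fuel, path, depths =>
    if depths.contains path then (depths.getD path 0, depths)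
    else
      match po.get? path with
      | none => (0, depths.insert path 0)
      | some p =>
        if p = "" then (0, depths.insert path 0)
        else
          match fuel with
          | 0 => (0, depths)
          | Nat.succ f =>
            let r := pvGetDepth po f p depths
            (r.1 + 1, r.2.insert path (r.1 + 1))

def build_depth_map_py (modules : List (List (String × String))) : List (String × Int) :=
  let po := pvParentOf modules
  (modules.foldl
    (fun depths m => (pvGetDepth po (po.size + 1) ((PySem.Dict.mk m).getD "module_path" "") depths).2)
    PySem.Dict.empty).items

-- ===== PORT B =====
-- climb the parent chain (cap = len(parent_of)+1 iterations, as in Source B),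
-- collecting unresolved nodes; acc head = node nearest the stop point
-- (= reversed(stack) in Source B).
def pvClimb (po : PySem.Dict String String) :
    Nat → String → List String → PySem.Dict String Int →
    List String × Int × PySem.Dict String Int
  | fuel, cur, acc, depths =>
    if depths.contains cur then (acc, depths.getD cur 0, depths)
    else
      match po.get? cur with
      | none => (acc, 0, depths.insert cur 0)
      | some p =>
        if p = "" then (acc, 0, depths.insert cur 0)
        else
          match fuel with
          | 0 => (acc, 0, depths)
          | Nat.succ f => pvClimb po f p (cur :: acc) depths

-- the root-downward assignment pass: d += 1; depths[node] = d
def pvAssign (acc : List String) (base : Int) (depths : PySem.Dict String Int) :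
    Int × PySem.Dict String Int :=
  acc.foldl (fun s node => (s.1 + 1, s.2.insert node (s.1 + 1))) (base, depths)

def pvResolve (po : PySem.Dict String String) (path : String)
    (depths : PySem.Dict String Int) : PySem.Dict String Int :=
  let c := pvClimb po (po.size + 1) path [] depths
  (pvAssign c.1 c.2.1 c.2.2).2

def build_depth_map_py_alt (modules : List (List (String × String))) : List (String × Int) :=
  let po := pvParentOf modules
  (modules.foldl
    (fun depths m => pvResolve po ((PySem.Dict.mk m).getD "module_path" "") depths)
    PySem.Dict.empty).items

-- ===== PRECONDITION & SPEC =====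
-- pvEscapes po n k: following the parent chain from k reaches, within n steps, a
-- node with no (truthy) parent or an empty parent.
def pvEscapes (po : PySem.Dict String String) : Nat → String → Bool
  | 0, _ => false
  | Nat.succ n, k =>
    match po.get? k with
    | none => true
    | some q => if q = "" then true else pvEscapes po n q

-- Pre_ excludes exactly the inputs whose parent chains are cyclic: there Python A
-- raises RecursionError (a chain of distinct keys has length ≤ size, so size+1
-- steps suffice to escape iff the chain is acyclic).
def Pre_build_depth_map_py (modules : List (List (String × String))) : Prop :=
  ∀ k ∈ (pvParentOf modules).keys,
    pvEscapes (pvParentOf modules) ((pvParentOf modules).size + 1) k = true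
instance (modules : List (List (String × String))) : Decidable (Pre_build_depth_map_py modules) := by unfold Pre_build_depth_map_py; infer_instance

def pvWitness_build_depth_map_py : (List (List (String × String))) :=
  [[("module_path", "a")], [("module_path", "b"), ("parent", "a")],
   [("module_path", "c"), ("parent", "b")]]

def Spec_build_depth_map_py (modules : List (List (String × String))) (out : List (String × Int)) : Prop := out = build_depth_map_py_alt modules
instance (modules : List (List (String × String))) (out : List (String × Int)) : Decidable (Spec_build_depth_map_py modules out) := by unfold Spec_build_depth_map_py; infer_instance

-- ===== CLAIM (what is proved, stated in full; the proofs are below) =====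
def Claim_equal_build_depth_map_py : Prop := ∀ (modules : List (List (String × String))), Dom_build_depth_map_py modules → Pre_build_depth_map_py modules → Spec_build_depth_map_py modules (build_depth_map_py modules)

-- ===== LEMMAS AND PROOFS =====

-- climb-then-assign computes exactly the memoized recursion (for every fuel)
lemma pvClimb_assign (po : PySem.Dict String String) :
    ∀ (fuel : Nat) (path : String) (acc : List String)
      (depths : PySem.Dict String Int),
      pvAssign (pvClimb po fuel path acc depths).1
        (pvClimb po fuel path acc depths).2.1 (pvClimb po fuel path acc depths).2.2
      = pvAssign acc (pvGetDepth po fuel path depths).1 (pvGetDepth po fuel path depths).2 := by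
  intro fuel
  induction fuel with
  | zero =>
    intro path acc depths
    rw [pvClimb, pvGetDepth]
    split_ifs with h
    · rfl
    · cases hp : po.get? path with
      | none => rfl
      | some p => by_cases hpe : p = "" <;> simp [hpe]
  | succ f ih =>
    intro path acc depths
    rw [pvClimb, pvGetDepth]
    split_ifs with h
    · rfl
    · cases hp : po.get? path with
      | none => rfl
      | some p =>
        by_cases hpe : p = ""
        · simp [hpe]
        · simp only [hpe, if_false]
          rw [ih p (path :: acc) depths]
          rfl

lemma pvResolve_eq (po : PySem.Dict String String) (path : String)
    (depths : PySem.Dict String Int) :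
    pvResolve po path depths = (pvGetDepth po (po.size + 1) path depths).2 := by
  unfold pvResolve
  have h := pvClimb_assign po (po.size + 1) path [] depths
  exact congrArg Prod.snd h

-- ===== VERDICT (by name: the statement is the Claim_ definition above) =====
theorem build_depth_map_py_spec : Claim_equal_build_depth_map_py := by
  intro modules _ _
  unfold Spec_build_depth_map_py build_depth_map_py build_depth_map_py_alt
  simp only [pvResolve_eq]
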